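-- pv_equiv track=rewrite | github.com/YallaTekrm/BOT | info_yt_auto.py | get_user_level
-- ===== SOURCE A (Python) =====
-- LEVELS = {
--     0: 0,
--     1: 20,
--     2: 50,
--     3: 120,
--     4: 250,
--     5: 500,
--     6: 1000,
--     7: 2000,
--     8: 3500
-- }
--
-- def get_user_level(total):
--     level = 0
--     next_level = None
--     for lvl, amount in LEVELS.items():
--         if total >= amount:
--             level = lvl
--         else:
--             next_level = (lvl, amount)
--             break
--     return level, next_level
-- ===== SOURCE B (Python) =====
-- import bisect
--
-- LEVELS = {
--     0: 0,
--     1: 20,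
--     2: 50,
--     3: 120,
--     4: 250,
--     5: 500,
--     6: 1000,
--     7: 2000,
--     8: 3500
-- }
--
-- _THRESHOLDS = list(LEVELS.values())
--
-- def get_user_level(total):
--     i = bisect.bisect_right(_THRESHOLDS, total)
--     level = max(0, i - 1)
--     next_level = (i, _THRESHOLDS[i]) if i < len(_THRESHOLDS) else None
--     return level, next_level
-- ===== Notes on version B (the rewrite author's own statement) =====
-- stated objective: idiomatic
-- what changed: Replaces the linear scan with a break over LEVELS.items() by a bisect_right binary search on the ascending thresholds list, computing level and next threshold from the insertion index.
import Mathlib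
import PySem

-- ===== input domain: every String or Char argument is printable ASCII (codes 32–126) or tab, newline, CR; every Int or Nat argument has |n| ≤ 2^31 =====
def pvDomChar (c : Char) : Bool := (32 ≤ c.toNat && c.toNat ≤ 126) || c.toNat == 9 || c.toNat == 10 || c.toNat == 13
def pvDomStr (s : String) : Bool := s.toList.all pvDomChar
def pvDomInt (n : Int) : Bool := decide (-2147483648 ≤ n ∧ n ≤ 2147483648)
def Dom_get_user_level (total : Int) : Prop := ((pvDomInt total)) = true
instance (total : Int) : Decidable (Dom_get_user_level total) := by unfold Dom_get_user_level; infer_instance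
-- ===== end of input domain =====

-- B replaces A's linear scan-with-break over LEVELS.items() by a bisect_right binary search on the ascending thresholds list (idiomatic; same results).


-- ===== PORT A =====
-- A: linear scan over LEVELS.items() with a break, tracking level and next_level
def pvLevelsA : List (Int × Int) := [(0,0),(1,20),(2,50),(3,120),(4,250),(5,500),(6,1000),(7,2000),(8,3500)]

def pvLoopA (total : Int) : List (Int × Int) → Int → Option (Int × Int) → Int × (Option (Int × Int))
  | [], level, next => (level, next)
  | (lvl, amount) :: rest, level, next =>
    if total ≥ amount then pvLoopA total rest lvl next
    else (level, some (lvl, amount))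

def get_user_level (total : Int) : Int × (Option (Int × Int)) :=
  pvLoopA total pvLevelsA 0 none

-- ===== PORT B =====
-- B: bisect_right on the ascending thresholds list (ported by its contract on a
-- sorted list: the number of elements ≤ total), then level/next from the index.
def pvThresholds : List Int := [0, 20, 50, 120, 250, 500, 1000, 2000, 3500]

def get_user_level_alt (total : Int) : Int × (Option (Int × Int)) :=
  let i : Int := (pvThresholds.countP (fun a => decide (a ≤ total)) : Nat)
  let level : Int := max 0 (i - 1)
  let next : Option (Int × Int) :=
    if i < (pvThresholds.length : Int) then
      (PySem.List.pyGet? pvThresholds i).map (fun v => (i, v))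
    else none
  (level, next)

-- ===== PRECONDITION & SPEC =====
def Spec_get_user_level (total : Int) (out : Int × (Option (Int × Int))) : Prop := out = get_user_level_alt total
instance (total : Int) (out : Int × (Option (Int × Int))) : Decidable (Spec_get_user_level total out) := by unfold Spec_get_user_level; infer_instance

-- ===== CLAIM (what is proved, stated in full; the proofs are below) =====
def Claim_equal_get_user_level : Prop := ∀ (total : Int), Dom_get_user_level total → Spec_get_user_level total (get_user_level total)

-- ===== LEMMAS AND PROOFS =====

-- ===== VERDICT (by name: the statement is the Claim_ definition above) =====
theorem get_user_level_spec : Claim_equal_get_user_level := by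
  intro t _
  unfold Spec_get_user_level get_user_level get_user_level_alt
  simp only [pvLevelsA, pvThresholds, pvLoopA, List.countP_cons, List.countP_nil, List.length]
  rcases Int.lt_or_le t 0 with h0|h0
  · norm_num [PySem.List.pyGet?, PySem.List.pyIdx?, show ¬((0:Int) ≤ t) from by omega, show ¬((20:Int) ≤ t) from by omega, show ¬((50:Int) ≤ t) from by omega, show ¬((120:Int) ≤ t) from by omega, show ¬((250:Int) ≤ t) from by omega, show ¬((500:Int) ≤ t) from by omega, show ¬((1000:Int) ≤ t) from by omega, show ¬((2000:Int) ≤ t) from by omega, show ¬((3500:Int) ≤ t) from by omega]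
  rcases Int.lt_or_le t 20 with h1|h1
  · norm_num [PySem.List.pyGet?, PySem.List.pyIdx?, show (0:Int) ≤ t from by omega, show ¬((20:Int) ≤ t) from by omega, show ¬((50:Int) ≤ t) from by omega, show ¬((120:Int) ≤ t) from by omega, show ¬((250:Int) ≤ t) from by omega, show ¬((500:Int) ≤ t) from by omega, show ¬((1000:Int) ≤ t) from by omega, show ¬((2000:Int) ≤ t) from by omega, show ¬((3500:Int) ≤ t) from by omega]
  rcases Int.lt_or_le t 50 with h2|h2
  · norm_num [PySem.List.pyGet?, PySem.List.pyIdx?, show (0:Int) ≤ t from by omega, show (20:Int) ≤ t from by omega, show ¬((50:Int) ≤ t) from by omega, show ¬((120:Int) ≤ t) from by omega, show ¬((250:Int) ≤ t) from by omega, show ¬((500:Int) ≤ t) from by omega, show ¬((1000:Int) ≤ t) from by omega, show ¬((2000:Int) ≤ t) from by omega, show ¬((3500:Int) ≤ t) from by omega] <;> decide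
  rcases Int.lt_or_le t 120 with h3|h3
  · norm_num [PySem.List.pyGet?, PySem.List.pyIdx?, show (0:Int) ≤ t from by omega, show (20:Int) ≤ t from by omega, show (50:Int) ≤ t from by omega, show ¬((120:Int) ≤ t) from by omega, show ¬((250:Int) ≤ t) from by omega, show ¬((500:Int) ≤ t) from by omega, show ¬((1000:Int) ≤ t) from by omega, show ¬((2000:Int) ≤ t) from by omega, show ¬((3500:Int) ≤ t) from by omega] <;> decide
  rcases Int.lt_or_le t 250 with h4|h4
  · norm_num [PySem.List.pyGet?, PySem.List.pyIdx?, show (0:Int) ≤ t from by omega, show (20:Int) ≤ t from by omega, show (50:Int) ≤ t from by omega, show (120:Int) ≤ t from by omega, show ¬((250:Int) ≤ t) from by omega, show ¬((500:Int) ≤ t) from by omega, show ¬((1000:Int) ≤ t) from by omega, show ¬((2000:Int) ≤ t) from by omega, show ¬((3500:Int) ≤ t) from by omega] <;> decide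
  rcases Int.lt_or_le t 500 with h5|h5
  · norm_num [PySem.List.pyGet?, PySem.List.pyIdx?, show (0:Int) ≤ t from by omega, show (20:Int) ≤ t from by omega, show (50:Int) ≤ t from by omega, show (120:Int) ≤ t from by omega, show (250:Int) ≤ t from by omega, show ¬((500:Int) ≤ t) from by omega, show ¬((1000:Int) ≤ t) from by omega, show ¬((2000:Int) ≤ t) from by omega, show ¬((3500:Int) ≤ t) from by omega] <;> decide
  rcases Int.lt_or_le t 1000 with h6|h6
  · norm_num [PySem.List.pyGet?, PySem.List.pyIdx?, show (0:Int) ≤ t from by omega, show (20:Int) ≤ t from by omega, show (50:Int) ≤ t from by omega, show (120:Int) ≤ t from by omega, show (250:Int) ≤ t from by omega, show (500:Int) ≤ t from by omega, show ¬((1000:Int) ≤ t) from by omega, show ¬((2000:Int) ≤ t) from by omega, show ¬((3500:Int) ≤ t) from by omega] <;> decide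
  rcases Int.lt_or_le t 2000 with h7|h7
  · norm_num [PySem.List.pyGet?, PySem.List.pyIdx?, show (0:Int) ≤ t from by omega, show (20:Int) ≤ t from by omega, show (50:Int) ≤ t from by omega, show (120:Int) ≤ t from by omega, show (250:Int) ≤ t from by omega, show (500:Int) ≤ t from by omega, show (1000:Int) ≤ t from by omega, show ¬((2000:Int) ≤ t) from by omega, show ¬((3500:Int) ≤ t) from by omega] <;> decide
  rcases Int.lt_or_le t 3500 with h8|h8
  · norm_num [PySem.List.pyGet?, PySem.List.pyIdx?, show (0:Int) ≤ t from by omega, show (20:Int) ≤ t from by omega, show (50:Int) ≤ t from by omega, show (120:Int) ≤ t from by omega, show (250:Int) ≤ t from by omega, show (500:Int) ≤ t from by omega, show (1000:Int) ≤ t from by omega, show (2000:Int) ≤ t from by omega, show ¬((3500:Int) ≤ t) from by omega] <;> decide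
  norm_num [PySem.List.pyGet?, PySem.List.pyIdx?, show (0:Int) ≤ t from by omega, show (20:Int) ≤ t from by omega, show (50:Int) ≤ t from by omega, show (120:Int) ≤ t from by omega, show (250:Int) ≤ t from by omega, show (500:Int) ≤ t from by omega, show (1000:Int) ≤ t from by omega, show (2000:Int) ≤ t from by omega, show (3500:Int) ≤ t from by omega]
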